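-- pv_equiv track=rewrite | github.com/andydiaz122/Kalshi_Quant | kalshi_qete/src/utils/orderbook.py | calculate_depth_at_price
-- ===== SOURCE A (Python) =====
-- from typing import List, Optional, Tuple
--
-- def calculate_depth_at_price(
--     bids: List[List[int]],
--     depth_cents: int = 5
-- ) -> int:
--     """
--     Calculate total volume within X cents of best bid.
--
--     Useful for measuring liquidity near the top of book.
--
--     Args:
--         bids: List of [price, quantity] pairs (sorted low→high)
--         depth_cents: How many cents from best bid to include
--
--     Returns:
--         Total quantity within the specified depth
--
--     Example:
--         >>> bids = [[40, 100], [42, 50], [44, 75], [45, 200]]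
--         >>> calculate_depth_at_price(bids, depth_cents=3)
--         325  # 44¢ (75) + 45¢ (200) = 275... wait let me recalc
--         # 45-3=42, so include 42,44,45 = 50+75+200 = 325
--     """
--     if not bids:
--         return 0
--
--     best_bid = bids[-1][0]  # Last element is highest
--     total_depth = 0
--
--     # Iterate backwards from best bid
--     for price, quantity in reversed(bids):
--         if best_bid - price <= depth_cents:
--             total_depth += quantity
--         else:
--             break  # Sorted, so no more within range
--
--     return total_depth
-- ===== SOURCE B (Python) =====
-- def calculate_depth_at_price(bids, depth_cents=5):
--     if not bids:
--         return 0
--     threshold = bids[-1][0] - depth_cents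
--     # Forward pass: remember the position just after the LAST below-threshold
--     # price; the answer is the quantity sum of the slice after it.
--     cut = 0
--     for i, (price, _) in enumerate(bids):
--         if price < threshold:
--             cut = i + 1
--     return sum(q for _, q in bids[cut:])
-- ===== Notes on version B (the rewrite author's own statement) =====
-- stated objective: alternative
-- what changed: Instead of A's reversed scan with early break and a running accumulator, B makes a forward indexed pass that records the position after the last below-threshold price and then sums the quantities of the slice from that position.
-- outside the precondition, e.g. on calculate_depth_at_price([[3], [10, 5]], -1): A returns 0, B raises ValueError
import Mathlib
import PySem

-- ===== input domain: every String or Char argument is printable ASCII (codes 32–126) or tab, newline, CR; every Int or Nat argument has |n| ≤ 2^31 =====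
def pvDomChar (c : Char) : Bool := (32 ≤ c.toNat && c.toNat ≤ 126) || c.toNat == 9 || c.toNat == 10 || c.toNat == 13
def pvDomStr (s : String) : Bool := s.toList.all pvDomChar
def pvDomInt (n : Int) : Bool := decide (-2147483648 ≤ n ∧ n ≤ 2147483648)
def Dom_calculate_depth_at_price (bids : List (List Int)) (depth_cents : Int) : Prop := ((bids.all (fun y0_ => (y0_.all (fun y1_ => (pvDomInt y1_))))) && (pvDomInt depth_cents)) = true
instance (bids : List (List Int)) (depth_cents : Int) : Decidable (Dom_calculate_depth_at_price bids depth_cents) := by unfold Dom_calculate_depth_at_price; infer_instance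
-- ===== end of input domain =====

-- B replaces A's reversed scan with early break and running accumulator by a
-- forward indexed pass locating the position after the last below-threshold
-- price, followed by a quantity sum over the slice from there (alternative, same cost).

-- ===== PORT A =====
-- row unpacking 'price, quantity = row': row[0] / row[1]; defaults unreachable under Pre_ (rows have length 2)
def pvFst (row : List Int) : Int := (PySem.List.pyGet? row 0).getD 0
def pvSnd (row : List Int) : Int := (PySem.List.pyGet? row 1).getD 0

-- 'for price, quantity in reversed(bids): … else: break' — structural recursion over bids.reverse
def loopA (best depth_cents : Int) : List (List Int) → Int → Int
  | [], total => total
  | row :: rest, total =>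
    if best - pvFst row ≤ depth_cents then loopA best depth_cents rest (total + pvSnd row)
    else total

def calculate_depth_at_price (bids : List (List Int)) (depth_cents : Int) : Int :=
  if bids = [] then 0
  else
    let best_bid := pvFst ((PySem.List.pyGet? bids (-1)).getD [])
    loopA best_bid depth_cents bids.reverse 0

-- ===== PORT B =====
-- 'for i, (price, _) in enumerate(bids): if price < threshold: cut = i + 1'
def cutLoop (threshold : Int) : List (List Int) → Nat → Nat → Nat
  | [], _, cut => cut
  | row :: rest, i, cut =>
    cutLoop threshold rest (i + 1) (if pvFst row < threshold then i + 1 else cut)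

def calculate_depth_at_price_alt (bids : List (List Int)) (depth_cents : Int) : Int :=
  if bids = [] then 0
  else
    let threshold := pvFst ((PySem.List.pyGet? bids (-1)).getD []) - depth_cents
    let cut := cutLoop threshold bids 0 0
    -- bids[cut:] with 0 ≤ cut ≤ len bids is List.drop; sum of the quantities
    ((bids.drop cut).map pvSnd).sum

-- ===== PRECONDITION & SPEC =====
-- Pre_ excludes order books with a malformed row (length ≠ 2): there tuple
-- unpacking raises ValueError, except that A's backward scan can break before
-- reaching the malformed row and return, while B's forward pass always reaches it.
def Pre_calculate_depth_at_price (bids : List (List Int)) (depth_cents : Int) : Prop :=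
  bids.all (fun row => row.length == 2) = true
instance (bids : List (List Int)) (depth_cents : Int) : Decidable (Pre_calculate_depth_at_price bids depth_cents) := by unfold Pre_calculate_depth_at_price; infer_instance

def pvWitness_calculate_depth_at_price : List (List Int) × Int := ([[40, 100], [42, 50], [44, 75], [45, 200]], 3)

def Spec_calculate_depth_at_price (bids : List (List Int)) (depth_cents : Int) (out : Int) : Prop := out = calculate_depth_at_price_alt bids depth_cents
instance (bids : List (List Int)) (depth_cents : Int) (out : Int) : Decidable (Spec_calculate_depth_at_price bids depth_cents out) := by unfold Spec_calculate_depth_at_price; infer_instance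

-- ===== CLAIM (what is proved, stated in full; the proofs are below) =====
def Claim_equal_calculate_depth_at_price : Prop := ∀ (bids : List (List Int)) (depth_cents : Int), Dom_calculate_depth_at_price bids depth_cents → Pre_calculate_depth_at_price bids depth_cents → Spec_calculate_depth_at_price bids depth_cents (calculate_depth_at_price bids depth_cents)

-- ===== LEMMAS AND PROOFS =====

def sumQ (l : List (List Int)) : Int := (l.map pvSnd).sum

theorem loopA_acc (best d : Int) (l : List (List Int)) (t : Int) :
    loopA best d l t = t + loopA best d l 0 := by
  induction l generalizing t with
  | nil => simp [loopA]
  | cons x xs ih =>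
    by_cases hx : best - pvFst x ≤ d
    · simp only [loopA, if_pos hx]
      rw [ih (t + pvSnd x), ih (0 + pvSnd x)]
      ring
    · simp only [loopA, if_neg hx]; omega

theorem cutLoop_append (th : Int) (xs ys : List (List Int)) (i cut : Nat) :
    cutLoop th (xs ++ ys) i cut = cutLoop th ys (i + xs.length) (cutLoop th xs i cut) := by
  induction xs generalizing i cut with
  | nil => simp [cutLoop]
  | cons x xs ih =>
    simp only [List.cons_append, cutLoop, ih, List.length_cons]
    ring_nf

-- main invariant: A's reversed early-break scan equals B's cut-and-sum
theorem loopA_eq_cut (best d : Int) (l : List (List Int)) :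
    cutLoop (best - d) l 0 0 ≤ l.length ∧
      loopA best d l.reverse 0 = sumQ (l.drop (cutLoop (best - d) l 0 0)) := by
  induction l using List.reverseRecOn with
  | nil => simp [cutLoop, loopA, sumQ]
  | append_singleton l x ih =>
    obtain ⟨hle, heq⟩ := ih
    have hcut : cutLoop (best - d) (l ++ [x]) 0 0 =
        if pvFst x < best - d then l.length + 1 else cutLoop (best - d) l 0 0 := by
      rw [cutLoop_append]
      simp [cutLoop]
    by_cases hx : pvFst x < best - d
    · refine ⟨by rw [hcut, if_pos hx]; simp, ?_⟩
      have hbad : ¬ best - pvFst x ≤ d := by omega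
      rw [hcut, if_pos hx, List.reverse_append]
      simp only [List.reverse_singleton, List.singleton_append, loopA, if_neg hbad]
      have hdrop : (l ++ [x]).drop (l.length + 1) = [] :=
        List.drop_eq_nil_of_le (by simp)
      simp [hdrop, sumQ]
    · refine ⟨by rw [hcut, if_neg hx]; simp; omega, ?_⟩
      have hgood : best - pvFst x ≤ d := by omega
      rw [hcut, if_neg hx]
      rw [List.reverse_append]
      simp only [List.reverse_singleton, List.singleton_append, loopA, if_pos hgood]
      rw [loopA_acc, heq]
      rw [List.drop_append_of_le_length hle]
      simp [sumQ]
      ring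

-- ===== VERDICT (by name: the statement is the Claim_ definition above) =====
theorem calculate_depth_at_price_spec : Claim_equal_calculate_depth_at_price := by
  intro bids d _ _
  unfold Spec_calculate_depth_at_price calculate_depth_at_price calculate_depth_at_price_alt
  by_cases hnil : bids = []
  · simp [hnil]
  · simp only [if_neg hnil]
    exact (loopA_eq_cut _ d bids).2
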